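-- pv_equiv track=rewrite | github.com/alWski/Prakt-15 | ex6.py | degree5
-- ===== SOURCE A (Python) =====
-- def degree5(n):
--     if n == 1:
--         return 0
--
--     if n < 1 or n % 5 != 0:
--         return -1
--
--     result = degree5(n // 5)
--
--     if result == -1:
--         return -1
--     else:
--         return result + 1
-- ===== SOURCE B (Python) =====
-- def degree5(n):
--     count = 0
--     while n != 1:
--         if n < 1 or n % 5 != 0:
--             return -1
--         n //= 5
--         count += 1
--     return count
-- ===== Notes on version B (the rewrite author's own statement) =====
-- stated objective: alternative
-- what changed: Replaces A's non-tail recursion that propagates the failure sentinel back up the call chain by an iterative while loop with an explicit counter returned directly.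
import Mathlib
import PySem

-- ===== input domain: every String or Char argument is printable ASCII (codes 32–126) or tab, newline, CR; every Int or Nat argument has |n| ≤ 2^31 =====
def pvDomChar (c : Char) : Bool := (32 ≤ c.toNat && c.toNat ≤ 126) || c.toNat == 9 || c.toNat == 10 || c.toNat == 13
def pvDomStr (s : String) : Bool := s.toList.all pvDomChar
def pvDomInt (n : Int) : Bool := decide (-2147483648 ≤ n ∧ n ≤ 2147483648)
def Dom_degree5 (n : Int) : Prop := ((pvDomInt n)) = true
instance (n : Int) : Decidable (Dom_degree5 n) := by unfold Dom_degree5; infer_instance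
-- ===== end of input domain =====

-- B replaces A's non-tail recursion (with failure-sentinel propagation) by an iterative loop with a counter; same values everywhere.

-- ===== PORT A =====
-- termination helper for the recursion/loop: n // 5 decreases when n ≥ 1 and n ≠ 1
theorem pvDec (n : Int) (_h1 : ¬ n = 1) (h2 : ¬ (n < 1 ∨ PySem.Int.mod n 5 ≠ 0)) :
    (PySem.Int.floordiv n 5).toNat < n.toNat := by
  rcases not_or.mp h2 with ⟨hn, _⟩
  rw [PySem.Int.floordiv_eq_ediv_of_pos (by norm_num : (0:Int) < 5)]
  omega

def degree5 (n : Int) : Int :=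
  if n = 1 then 0
  else if n < 1 ∨ PySem.Int.mod n 5 ≠ 0 then -1
  else
    let result := degree5 (PySem.Int.floordiv n 5)
    if result = -1 then -1 else result + 1
termination_by n.toNat
decreasing_by exact pvDec n (by assumption) (by assumption)

-- ===== PORT B =====
-- Source B's while loop, as the usual tail recursion in the loop state (n, count)
def degree5_alt_loop (n : Int) (count : Int) : Int :=
  if h1 : n ≠ 1 then
    if n < 1 ∨ PySem.Int.mod n 5 ≠ 0 then -1
    else degree5_alt_loop (PySem.Int.floordiv n 5) (count + 1)
  else count
termination_by n.toNat
decreasing_by exact pvDec n h1 (by assumption)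

def degree5_alt (n : Int) : Int := degree5_alt_loop n 0

-- ===== PRECONDITION & SPEC =====
def Spec_degree5 (n : Int) (out : Int) : Prop := out = degree5_alt n
instance (n : Int) (out : Int) : Decidable (Spec_degree5 n out) := by unfold Spec_degree5; infer_instance

-- ===== CLAIM (what is proved, stated in full; the proofs are below) =====
def Claim_equal_degree5 : Prop := ∀ (n : Int), Dom_degree5 n → Spec_degree5 n (degree5 n)

-- ===== LEMMAS AND PROOFS =====

-- A's result is -1 or nonnegative (strong induction on n.toNat)
theorem pvNonneg (k : Nat) : ∀ (n : Int), n.toNat ≤ k → degree5 n = -1 ∨ 0 ≤ degree5 n := by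
  induction k with
  | zero =>
    intro n hk
    rw [degree5]
    by_cases hn1 : n = 1
    · rw [if_pos hn1]; right; norm_num
    · rw [if_neg hn1, if_pos (Or.inl (show n < 1 by omega))]; left; rfl
  | succ k ih =>
    intro n hk
    rw [degree5]
    by_cases hn1 : n = 1
    · rw [if_pos hn1]; right; norm_num
    · rw [if_neg hn1]
      by_cases hg : n < 1 ∨ PySem.Int.mod n 5 ≠ 0
      · rw [if_pos hg]; left; rfl
      · rw [if_neg hg]
        have hd := pvDec n hn1 hg
        rcases ih (PySem.Int.floordiv n 5) (by omega) with hr | hr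
        · rw [if_pos hr]; left; rfl
        · rw [if_neg (show ¬ degree5 (PySem.Int.floordiv n 5) = -1 by omega)]; right; omega

-- loop invariant: the loop returns -1 exactly when A does, and otherwise A's value plus the counter
theorem pvLoop_eq (k : Nat) : ∀ (n count : Int), n.toNat ≤ k →
    degree5_alt_loop n count = (if degree5 n = -1 then -1 else degree5 n + count) := by
  induction k with
  | zero =>
    intro n count hk
    rw [degree5_alt_loop, degree5]
    by_cases hn1 : n = 1
    · rw [dif_neg (show ¬ n ≠ 1 by simpa using hn1), if_pos hn1]; norm_num [hn1]
    · have hg : n < 1 ∨ PySem.Int.mod n 5 ≠ 0 := Or.inl (by omega)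
      rw [dif_pos (show n ≠ 1 from hn1), if_pos hg, if_neg hn1, if_pos hg]
      norm_num
  | succ k ih =>
    intro n count hk
    rw [degree5_alt_loop, degree5]
    by_cases hn1 : n = 1
    · rw [dif_neg (show ¬ n ≠ 1 by simpa using hn1), if_pos hn1]; norm_num [hn1]
    · rw [dif_pos (show n ≠ 1 from hn1), if_neg hn1]
      by_cases hg : n < 1 ∨ PySem.Int.mod n 5 ≠ 0
      · rw [if_pos hg, if_pos hg]; norm_num
      · have hd := pvDec n hn1 hg
        rw [if_neg hg, if_neg hg, ih _ _ (by omega)]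
        rcases pvNonneg (PySem.Int.floordiv n 5).toNat (PySem.Int.floordiv n 5) le_rfl with hr | hr
        · rw [if_pos hr, if_pos hr]; norm_num
        · rw [if_neg (show ¬ degree5 (PySem.Int.floordiv n 5) = -1 by omega),
              if_neg (show ¬ degree5 (PySem.Int.floordiv n 5) = -1 by omega),
              if_neg (show ¬ degree5 (PySem.Int.floordiv n 5) + 1 = -1 by omega)]
          ring

theorem pvMain (n : Int) : degree5 n = degree5_alt n := by
  rw [degree5_alt, pvLoop_eq n.toNat n 0 le_rfl]
  rcases pvNonneg n.toNat n le_rfl with h | h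
  · rw [if_pos h]; exact h
  · rw [if_neg (by omega)]; ring

-- ===== VERDICT (by name: the statement is the Claim_ definition above) =====
theorem degree5_spec : Claim_equal_degree5 := by
  intro n _
  unfold Spec_degree5
  exact pvMain n
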